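-- pv_equiv track=rewrite | github.com/nitro-panks/battlestats | server/warships/data.py | _build_tier_type_x_labels
-- ===== SOURCE A (Python) =====
-- from typing import Dict, Any, Optional, Iterable
--
-- PLAYER_TIER_TYPE_ORDER = {
--     'Destroyer': 0,
--     'Cruiser': 1,
--     'Battleship': 2,
--     'Aircraft Carrier': 3,
--     'Submarine': 4,
-- }
--
-- def _tier_type_sort_key(ship_type: str, ship_tier: Optional[int] = None) -> tuple[int, str, int]:
--     tier_component = -(ship_tier or 0)
--     return (PLAYER_TIER_TYPE_ORDER.get(ship_type, len(PLAYER_TIER_TYPE_ORDER)), ship_type, tier_component)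
--
-- def _build_tier_type_x_labels(observed_ship_types: set[str]) -> list[str]:
--     canonical_labels = [
--         ship_type
--         for ship_type, _ in sorted(
--             PLAYER_TIER_TYPE_ORDER.items(),
--             key=lambda item: item[1],
--         )
--     ]
--     extra_labels = sorted(
--         [
--             ship_type
--             for ship_type in observed_ship_types
--             if ship_type not in PLAYER_TIER_TYPE_ORDER
--         ],
--         key=lambda ship_type: _tier_type_sort_key(ship_type),
--     )
--     return canonical_labels + extra_labels
-- ===== SOURCE B (Python) =====
-- from typing import Optional
--
-- PLAYER_TIER_TYPE_ORDER = {
--     'Destroyer': 0,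
--     'Cruiser': 1,
--     'Battleship': 2,
--     'Aircraft Carrier': 3,
--     'Submarine': 4,
-- }
--
-- def _tier_type_sort_key(ship_type: str, ship_tier: Optional[int] = None) -> tuple[int, str, int]:
--     tier_component = -(ship_tier or 0)
--     return (PLAYER_TIER_TYPE_ORDER.get(ship_type, len(PLAYER_TIER_TYPE_ORDER)), ship_type, tier_component)
--
-- def _build_tier_type_x_labels(observed_ship_types: set[str]) -> list[str]:
--     labels = set(PLAYER_TIER_TYPE_ORDER) | set(observed_ship_types)
--     return sorted(labels, key=_tier_type_sort_key)
-- ===== Notes on version B (the rewrite author's own statement) =====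
-- stated objective: simpler
-- what changed: A builds the canonical labels by sorting the dict items and the extra labels by a second filtered sort, then concatenates; B forms one set (canonical keys union observed types) and returns a single sort under the shared rank/name key, whose rank component (0-4 canonical, 5 extras) reproduces A's concatenation order.
import Mathlib
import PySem

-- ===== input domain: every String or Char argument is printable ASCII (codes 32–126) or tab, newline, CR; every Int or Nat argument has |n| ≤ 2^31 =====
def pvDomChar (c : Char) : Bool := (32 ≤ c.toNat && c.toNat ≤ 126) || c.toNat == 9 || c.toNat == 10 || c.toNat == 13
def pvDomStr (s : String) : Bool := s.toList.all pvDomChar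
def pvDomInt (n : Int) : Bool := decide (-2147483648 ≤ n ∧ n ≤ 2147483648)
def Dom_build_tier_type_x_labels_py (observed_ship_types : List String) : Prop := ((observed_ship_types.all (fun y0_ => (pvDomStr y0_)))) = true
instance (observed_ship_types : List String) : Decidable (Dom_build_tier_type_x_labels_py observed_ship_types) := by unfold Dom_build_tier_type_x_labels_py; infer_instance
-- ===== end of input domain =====

-- B replaces A's two comprehensions-plus-sorts-then-concatenate by one unified sort of the
-- union of canonical keys and observed types under the shared sort key (simpler decomposition).


-- ===== PORT A =====
def PLAYER_TIER_TYPE_ORDER : PySem.Dict String Int :=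
  PySem.Dict.ofList
    [("Destroyer", 0), ("Cruiser", 1), ("Battleship", 2), ("Aircraft Carrier", 3), ("Submarine", 4)]

-- _tier_type_sort_key; '(ship_tier or 0)' equals ship_tier.getD 0: None is falsy (→ 0) and an
-- int x gives x when x ≠ 0 and 0 when x == 0, i.e. always x.
def tier_type_sort_key (ship_type : String) (ship_tier : Option Int) : Int × String × Int :=
  let tier_component : Int := -(ship_tier.getD 0)
  (PySem.Dict.getD PLAYER_TIER_TYPE_ORDER ship_type ((PySem.Dict.size PLAYER_TIER_TYPE_ORDER : Nat) : Int),
   ship_type, tier_component)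

-- Both Pythons sort with key _tier_type_sort_key(s) = (rank, s, 0): the third tuple component is
-- the constant 0 (ship_tier is None), so the tuple key is exactly the two-component key
-- (rank, s), ported with PySem.List.sorted2 as PYSEM.md prescribes for tuple keys.
def build_tier_type_x_labels_py (observed_ship_types : List String) : List String :=
  let canonical_labels :=
    (PySem.List.sorted PLAYER_TIER_TYPE_ORDER.items (fun item => item.2) false).map (fun item => item.1)
  let extra_labels :=
    PySem.List.sorted2
      (observed_ship_types.filter (fun s => !(PySem.Dict.contains PLAYER_TIER_TYPE_ORDER s)))
      (fun s => (tier_type_sort_key s none).1) (fun s => (tier_type_sort_key s none).2.1) false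
  canonical_labels ++ extra_labels

-- ===== PORT B =====
def build_tier_type_x_labels_py_alt (observed_ship_types : List String) : List String :=
  let labels :=
    PySem.Set.union (PySem.Set.ofList (PySem.Dict.keys PLAYER_TIER_TYPE_ORDER)) observed_ship_types
  PySem.List.sorted2 labels
    (fun s => (tier_type_sort_key s none).1) (fun s => (tier_type_sort_key s none).2.1) false

-- ===== PRECONDITION & SPEC =====
-- Pre_ is only the set-representation invariant: the Python argument is a set[str], so its
-- List String encoding holds distinct elements; no Python input is excluded.
def Pre_build_tier_type_x_labels_py (observed_ship_types : List String) : Prop :=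
  observed_ship_types.Nodup
instance (observed_ship_types : List String) : Decidable (Pre_build_tier_type_x_labels_py observed_ship_types) := by unfold Pre_build_tier_type_x_labels_py; infer_instance
def pvWitness_build_tier_type_x_labels_py : List String := ["Frigate", "Cruiser"]

def Spec_build_tier_type_x_labels_py (observed_ship_types : List String) (out : List String) : Prop := out = build_tier_type_x_labels_py_alt observed_ship_types
instance (observed_ship_types : List String) (out : List String) : Decidable (Spec_build_tier_type_x_labels_py observed_ship_types out) := by unfold Spec_build_tier_type_x_labels_py; infer_instance

-- ===== CLAIM (what is proved, stated in full; the proofs are below) =====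
def Claim_equal_build_tier_type_x_labels_py : Prop := ∀ (observed_ship_types : List String), Dom_build_tier_type_x_labels_py observed_ship_types → Pre_build_tier_type_x_labels_py observed_ship_types → Spec_build_tier_type_x_labels_py observed_ship_types (build_tier_type_x_labels_py observed_ship_types)

-- ===== LEMMAS AND PROOFS =====

-- the canonical key list, and the rank / lexicographic key used by both sorts
def pvKeys : List String := ["Destroyer", "Cruiser", "Battleship", "Aircraft Carrier", "Submarine"]
def pvRank (s : String) : Int := (tier_type_sort_key s none).1
def pvKey (s : String) : Lex (Int × String) := toLex (pvRank s, s)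

-- sorted2 with an Int first key and a String second key is sorted under the lexicographic key
lemma pv_sorted2_eq_sorted_lex {α : Type} (xs : List α) (k1 : α → Int) (k2 : α → String) :
    PySem.List.sorted2 xs k1 k2 false
      = PySem.List.sorted xs (fun a => toLex (k1 a, k2 a)) false := by
  unfold PySem.List.sorted2 PySem.List.sorted
  simp only [if_neg (by decide : ¬ (false = true))]
  congr 1
  funext acc x
  congr 1
  funext a b
  rcases lt_trichotomy (k1 a) (k1 b) with h | h | h
  · simp [Prod.Lex.lt_iff, h, asymm h]
  · simp [Prod.Lex.lt_iff, h]
  · simp [Prod.Lex.lt_iff, h, asymm h]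
    intro he; exact absurd he (ne_of_gt h)

lemma pv_update_eq_append_filter (obs : List String) : ∀ acc : List String, obs.Nodup →
    PySem.Set.update acc obs = acc ++ obs.filter (fun s => decide (s ∉ acc)) := by
  induction obs with
  | nil => intro acc _; simp [PySem.Set.update_nil]
  | cons x xs ih =>
    intro acc h
    rw [List.nodup_cons] at h
    rw [PySem.Set.update_cons]
    by_cases hx : x ∈ acc
    · rw [PySem.Set.add_of_mem hx, ih acc h.2]
      simp [hx]
    · rw [PySem.Set.add_of_not_mem hx, ih _ h.2]
      simp only [List.filter_cons, hx, not_false_iff, decide_true, List.append_assoc]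
      congr 1
      simp only [List.cons_append, List.nil_append, decide_not]
      congr 1
      apply List.filter_congr
      intro y hy
      have hyx : y ≠ x := fun he => h.1 (he ▸ hy)
      simp [List.mem_append, hyx]

lemma pvKey_lt_of_rank_lt {a b : String} (h : pvRank a < pvRank b) : pvKey a < pvKey b :=
  Prod.Lex.lt_iff.mpr (Or.inl h)

lemma pvKey_inj {a b : String} (h : pvKey a = pvKey b) : a = b := by
  have := congrArg (fun x => (ofLex x).2) h
  simpa [pvKey] using this

lemma pvRank_of_not_mem {s : String} (h : s ∉ pvKeys) : pvRank s = 5 := by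
  have hc : PySem.Dict.contains PLAYER_TIER_TYPE_ORDER s = false := by
    rw [PySem.Dict.contains_eq_decide_mem_keys]
    have : PySem.Dict.keys PLAYER_TIER_TYPE_ORDER = pvKeys := by decide
    simp [this, h]
  show (tier_type_sort_key s none).1 = 5
  unfold tier_type_sort_key
  simp only []
  rw [PySem.Dict.getD_of_not_contains _ _ hc]
  decide

lemma pvRank_lt_five_of_mem {s : String} (h : s ∈ pvKeys) : pvRank s < 5 := by
  simp only [pvKeys, List.mem_cons, List.not_mem_nil, or_false] at h
  rcases h with rfl | rfl | rfl | rfl | rfl <;> decide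

lemma pv_main (obs : List String) (hpre : obs.Nodup) :
    build_tier_type_x_labels_py obs = build_tier_type_x_labels_py_alt obs := by
  unfold build_tier_type_x_labels_py build_tier_type_x_labels_py_alt
  -- name the filtered extras
  have hfilter : obs.filter (fun s => !(PySem.Dict.contains PLAYER_TIER_TYPE_ORDER s))
      = obs.filter (fun s => decide (s ∉ pvKeys)) := by
    apply List.filter_congr
    intro y _
    rw [PySem.Dict.contains_eq_decide_mem_keys]
    have : PySem.Dict.keys PLAYER_TIER_TYPE_ORDER = pvKeys := by decide
    simp [this]
  set zs := obs.filter (fun s => decide (s ∉ pvKeys)) with hzs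
  have hcanon : (PySem.List.sorted PLAYER_TIER_TYPE_ORDER.items (fun item => item.2) false).map
      (fun item => item.1) = pvKeys := by decide
  have hkey : (fun a : String =>
      toLex ((tier_type_sort_key a none).1, (tier_type_sort_key a none).2.1)) = pvKey := rfl
  rw [hcanon, hfilter, pv_sorted2_eq_sorted_lex, pv_sorted2_eq_sorted_lex, hkey]
  -- the union is pvKeys ++ zs
  have hunion : PySem.Set.union (PySem.Set.ofList (PySem.Dict.keys PLAYER_TIER_TYPE_ORDER)) obs
      = pvKeys ++ zs := by
    have h1 : PySem.Set.ofList (PySem.Dict.keys PLAYER_TIER_TYPE_ORDER) = pvKeys := by decide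
    show PySem.Set.update _ obs = _
    rw [h1, pv_update_eq_append_filter obs pvKeys hpre]
  rw [hunion]
  -- nodup and rank facts about zs and its sort
  have hzsnd : zs.Nodup := hpre.filter _
  have hznotmem : ∀ s ∈ zs, s ∉ pvKeys := by
    intro s hs
    have := List.of_mem_filter hs
    simpa using this
  set es := PySem.List.sorted zs pvKey false with hes
  have hperm : es.Perm zs := PySem.List.sorted_perm zs pvKey false
  have hesnd : es.Nodup := hperm.nodup_iff.mpr hzsnd
  have hesmem : ∀ s ∈ es, s ∉ pvKeys := fun s hs => hznotmem s (hperm.mem_iff.mp hs)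
  -- the concatenation is strictly increasing under pvKey
  have hpair : (pvKeys ++ es).Pairwise (fun a b => pvKey a < pvKey b) := by
    rw [List.pairwise_append]
    refine ⟨?_, ?_, ?_⟩
    · have h0 : pvKeys.Pairwise (fun a b => pvRank a < pvRank b) := by decide
      exact h0.imp pvKey_lt_of_rank_lt
    · have hle : es.Pairwise (fun a b => pvKey a ≤ pvKey b) :=
        PySem.List.sorted_pairwise zs pvKey
      have := hle.and hesnd
      exact this.imp (fun h => lt_of_le_of_ne h.1 (fun he => h.2 (pvKey_inj he)))
    · intro a ha b hb
      apply pvKey_lt_of_rank_lt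
      have h1 := pvRank_lt_five_of_mem ha
      have h2 := pvRank_of_not_mem (hesmem b hb)
      omega
  -- strictly increasing rearrangement of the union IS its sort
  exact (PySem.List.sorted_eq_of_perm_of_pairwise_lt (pvKeys ++ zs) (pvKeys ++ es) pvKey
    (hperm.append_left pvKeys) hpair).symm

-- ===== VERDICT (by name: the statement is the Claim_ definition above) =====
theorem build_tier_type_x_labels_py_spec : Claim_equal_build_tier_type_x_labels_py := by
  intro obs _ hpre
  unfold Spec_build_tier_type_x_labels_py
  exact pv_main obs hpre
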